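-- pv_equiv track=rewrite | github.com/jcwlin/hansa-test | app.py | enforce_column_order_list
-- ===== SOURCE A (Python) =====
-- def enforce_column_order_list(data_list):
--     """Enforce column order for list data"""
--     if not data_list:
--         return data_list
--
--     desired_order = [
--         'Cargo #', 'BL number', 'B/L quantity (MT)', 'B/L split quantity (MT)',
--         'Cargo name', 'Charterer', 'Consignee, order to', 'Notify',
--         'Stow', 'LoadPort', 'Disch. Port', 'OBL release date', 'Release cargo against'
--     ]
--
--     # Reorder each item's columns
--     ordered_data = []
--     for item in data_list:
--         ordered_item = {}
--
--         # First add columns in desired_order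
--         for col in desired_order:
--             if col in item:
--                 ordered_item[col] = item[col]
--
--         # Then add other columns
--         for key, value in item.items():
--             if key not in ordered_item:
--                 ordered_item[key] = value
--
--         ordered_data.append(ordered_item)
--
--     return ordered_data
-- ===== SOURCE B (Python) =====
-- def enforce_column_order_list(data_list):
--     """Enforce column order for list data (single grouping pass per item)."""
--     if not data_list:
--         return data_list
--
--     desired_order = [
--         'Cargo #', 'BL number', 'B/L quantity (MT)', 'B/L split quantity (MT)',
--         'Cargo name', 'Charterer', 'Consignee, order to', 'Notify',
--         'Stow', 'LoadPort', 'Disch. Port', 'OBL release date', 'Release cargo against'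
--     ]
--     wanted = set(desired_order)
--
--     def reorder(item):
--         groups = {}
--         for k, v in item.items():
--             groups.setdefault(k if k in wanted else None, []).append((k, v))
--         pairs = []
--         for c in desired_order:
--             pairs.extend(groups.get(c, []))
--         pairs.extend(groups.get(None, []))
--         return dict(pairs)
--
--     return [reorder(item) for item in data_list]
-- ===== Notes on version B (the rewrite author's own statement) =====
-- stated objective: alternative
-- what changed: A builds each ordered dict by testing all 13 desired columns against the item and then re-scanning the item against the partly built dict; B makes one grouping pass per item (bucketing pairs by destination column via setdefault) and then concatenates the buckets in desired order, returning dict(pairs).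
import Mathlib
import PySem

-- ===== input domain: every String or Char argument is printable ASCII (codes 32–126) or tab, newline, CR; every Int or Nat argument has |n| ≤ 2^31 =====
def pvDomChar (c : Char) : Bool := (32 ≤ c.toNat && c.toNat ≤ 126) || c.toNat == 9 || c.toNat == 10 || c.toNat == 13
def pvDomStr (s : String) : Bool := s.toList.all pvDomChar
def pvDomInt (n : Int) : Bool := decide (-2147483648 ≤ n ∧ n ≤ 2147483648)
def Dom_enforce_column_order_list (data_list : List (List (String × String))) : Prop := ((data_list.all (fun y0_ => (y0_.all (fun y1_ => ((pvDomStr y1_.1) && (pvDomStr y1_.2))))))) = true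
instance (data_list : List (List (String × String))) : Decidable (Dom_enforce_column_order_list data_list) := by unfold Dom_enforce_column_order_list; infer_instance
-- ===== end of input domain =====

-- B replaces A's per-item double pass (13 membership tests into the item, then a re-scan of the
-- item against the partly built dict) by one grouping pass per item followed by concatenating the
-- groups in the desired order (objective: alternative; not claimed faster).
-- Each Python dict is modelled as its items list in insertion order.

-- ===== PORT A =====
def pvDesiredOrder : List String :=
  ["Cargo #", "BL number", "B/L quantity (MT)", "B/L split quantity (MT)",
   "Cargo name", "Charterer", "Consignee, order to", "Notify",
   "Stow", "LoadPort", "Disch. Port", "OBL release date", "Release cargo against"]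

-- one iteration of A's outer loop: build ordered_item for one item
def pvOrderedItemA (item : List (String × String)) : List (String × String) :=
  -- First add columns in desired_order
  let d1 := pvDesiredOrder.foldl (fun oi col =>
      match (PySem.Dict.mk item).get? col with
      | some v => oi.insert col v          -- col in item: ordered_item[col] = item[col]
      | none   => oi) PySem.Dict.empty
  -- Then add other columns
  let d2 := item.foldl (fun oi kv =>
      if oi.contains kv.1 then oi else oi.insert kv.1 kv.2) d1
  d2.items

def enforce_column_order_list (data_list : List (List (String × String))) : List (List (String × String)) :=
  if data_list.isEmpty then data_list
  else data_list.foldl (fun ordered_data item => ordered_data ++ [pvOrderedItemA item]) []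

-- ===== PORT B =====
-- reorder(item): group the pairs by destination column (none bucket = not a desired column),
-- then emit the groups in desired order followed by the none bucket, and make a dict of them.
def pvReorderB (item : List (String × String)) : List (String × String) :=
  let wanted := PySem.Set.ofList pvDesiredOrder
  let groups := item.foldl (fun g kv =>
      g.modify (if wanted.contains kv.1 then some kv.1 else none) [] (· ++ [kv]))
      (PySem.Dict.empty : PySem.Dict (Option String) (List (String × String)))
  let pairs := pvDesiredOrder.foldl (fun acc c => acc ++ groups.getD (some c) []) []
  let pairs := pairs ++ groups.getD none []
  (pairs.foldl (fun d kv => d.insert kv.1 kv.2)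
    (PySem.Dict.empty : PySem.Dict String String)).items   -- dict(pairs)

def enforce_column_order_list_alt (data_list : List (List (String × String))) : List (List (String × String)) :=
  if data_list.isEmpty then data_list
  else data_list.map pvReorderB

-- ===== PRECONDITION & SPEC =====
-- Pre_ excludes association lists in which some item repeats a key: a Python dict cannot contain
-- duplicate keys, so such lists encode no input of either Python program.
def Pre_enforce_column_order_list (data_list : List (List (String × String))) : Prop :=
  ∀ item ∈ data_list, (item.map Prod.fst).Nodup
instance (data_list : List (List (String × String))) : Decidable (Pre_enforce_column_order_list data_list) := by unfold Pre_enforce_column_order_list; infer_instance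
def pvWitness_enforce_column_order_list : (List (List (String × String))) :=
  [[("BL number", "7"), ("extra", "x"), ("Cargo #", "1")]]

def Spec_enforce_column_order_list (data_list : List (List (String × String))) (out : List (List (String × String))) : Prop := out = enforce_column_order_list_alt data_list
instance (data_list : List (List (String × String))) (out : List (List (String × String))) : Decidable (Spec_enforce_column_order_list data_list out) := by unfold Spec_enforce_column_order_list; infer_instance

-- ===== CLAIM (what is proved, stated in full; the proofs are below) =====
def Claim_equal_enforce_column_order_list : Prop := ∀ (data_list : List (List (String × String))), Dom_enforce_column_order_list data_list → Pre_enforce_column_order_list data_list → Spec_enforce_column_order_list data_list (enforce_column_order_list data_list)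

-- ===== LEMMAS AND PROOFS =====

-- the common normal form both per-item computations reach
def pvTarget (item : List (String × String)) : List (String × String) :=
  pvDesiredOrder.flatMap (fun c => item.filter (fun kv => kv.1 == c))
    ++ item.filter (fun kv => !(pvDesiredOrder.contains kv.1))

theorem pv_filter_nil_of_not_mem (item : List (String × String)) (c : String)
    (h : c ∉ item.map Prod.fst) : item.filter (fun kv => kv.1 == c) = [] := by
  rw [List.filter_eq_nil_iff]
  intro kv hkv hb
  exact h (List.mem_map.mpr ⟨kv, hkv, by simpa [beq_iff_eq] using hb⟩)

-- first-match lookup on a duplicate-free item, as a filter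
theorem pv_filter_eq_get? (item : List (String × String)) (hnd : (item.map Prod.fst).Nodup)
    (c : String) :
    item.filter (fun kv => kv.1 == c)
      = ((PySem.Dict.mk item).get? c).elim [] (fun v => [(c, v)]) := by
  induction item with
  | nil => simp [PySem.Dict.get?]
  | cons kv rest ih =>
    obtain ⟨k, v⟩ := kv
    simp only [List.map_cons, List.nodup_cons] at hnd
    rw [PySem.Dict.get?_mk_cons]
    by_cases hk : k = c
    · subst hk
      simp only [List.filter_cons, beq_self_eq_true, if_pos trivial]
      simp [pv_filter_nil_of_not_mem rest k hnd.1]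
    · have hb : (k == c) = false := by simp [hk]
      simp only [List.filter_cons, hb]
      simpa using ih hnd.2

theorem pv_get?_isSome_of_mem (item : List (String × String)) (kv : String × String)
    (h : kv ∈ item) : ((PySem.Dict.mk item).get? kv.1).isSome = true := by
  rcases ho : (PySem.Dict.mk item).get? kv.1 with _ | v
  · have hnk := (PySem.Dict.get?_eq_none_iff_not_mem_keys (PySem.Dict.mk item) kv.1).mp ho
    have hk : kv.1 ∈ (PySem.Dict.mk item).keys := by
      simp only [PySem.Dict.keys, List.mem_map]
      exact ⟨kv, h, rfl⟩
    exact absurd hk hnk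
  · rfl

-- A's first loop over fresh distinct columns, as a filterMap
theorem pv_loop1 (item : List (String × String)) (cols : List String)
    (d : PySem.Dict String String) (hf : ∀ c ∈ cols, d.contains c = false)
    (hnd : cols.Nodup) :
    (cols.foldl (fun oi col =>
        match (PySem.Dict.mk item).get? col with
        | some v => oi.insert col v
        | none   => oi) d).items
      = d.items ++ cols.filterMap (fun c => ((PySem.Dict.mk item).get? c).map (fun v => (c, v))) := by
  induction cols generalizing d with
  | nil => simp
  | cons c cols ih =>
    simp only [List.nodup_cons] at hnd
    rcases ho : (PySem.Dict.mk item).get? c with _ | v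
    · simp only [List.foldl_cons, ho]
      rw [ih d (fun c' hc' => hf c' (List.mem_cons_of_mem _ hc')) hnd.2]
      simp [ho]
    · simp only [List.foldl_cons, ho]
      rw [ih (d.insert c v) ?_ hnd.2]
      · rw [PySem.Dict.items_insert_of_not_contains d v (hf c (List.mem_cons_self ..))]
        simp [ho]
      · intro c' hc'
        rw [PySem.Dict.contains_insert]
        have hne : c' ≠ c := fun h => hnd.1 (h ▸ hc')
        simp only [Bool.or_eq_false_iff]
        exact ⟨by simp [hne], hf c' (List.mem_cons_of_mem _ hc')⟩

-- A's second loop appends exactly the pairs whose key d does not yet contain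
theorem pv_loop2 (l : List (String × String)) (d : PySem.Dict String String)
    (hnd : (l.map Prod.fst).Nodup) :
    (l.foldl (fun oi kv => if oi.contains kv.1 then oi else oi.insert kv.1 kv.2) d).items
      = d.items ++ l.filter (fun kv => !(d.contains kv.1)) := by
  induction l generalizing d with
  | nil => simp
  | cons kv l ih =>
    simp only [List.map_cons, List.nodup_cons] at hnd
    by_cases hc : d.contains kv.1
    · simp only [List.foldl_cons, List.filter_cons, hc, Bool.not_true]
      simpa using ih d hnd.2
    · have hcf : d.contains kv.1 = false := by simpa using hc
      simp only [List.foldl_cons, hcf, Bool.false_eq_true, if_false, List.filter_cons,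
        Bool.not_false]
      rw [ih (d.insert kv.1 kv.2) hnd.2,
        PySem.Dict.items_insert_of_not_contains d kv.2 hcf,
        List.filter_congr (q := fun kv' => !(d.contains kv'.1)) ?_]
      · simp
      · intro kv' hkv'
        rw [PySem.Dict.contains_insert]
        have hne : kv'.1 ≠ kv.1 := fun h => hnd.1 (h ▸ List.mem_map.mpr ⟨kv', hkv', rfl⟩)
        simp [hne]

-- the flatMap-of-filters form equals A's filterMap form
theorem pv_flatMap_eq_filterMap (item : List (String × String))
    (hnd : (item.map Prod.fst).Nodup) (cols : List String) :
    cols.flatMap (fun c => item.filter (fun kv => kv.1 == c))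
      = cols.filterMap (fun c => ((PySem.Dict.mk item).get? c).map (fun v => (c, v))) := by
  induction cols with
  | nil => simp
  | cons c cols ih =>
    rw [List.flatMap_cons, pv_filter_eq_get? item hnd c, List.filterMap_cons, ih]
    rcases (PySem.Dict.mk item).get? c with _ | v <;> simp

-- keys of the flatMap part, as a filter of cols
theorem pv_flatMap_keys (item : List (String × String))
    (hnd : (item.map Prod.fst).Nodup) (cols : List String) :
    (cols.flatMap (fun c => item.filter (fun kv => kv.1 == c))).map Prod.fst
      = cols.filter (fun c => ((PySem.Dict.mk item).get? c).isSome) := by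
  induction cols with
  | nil => simp
  | cons c cols ih =>
    rw [List.flatMap_cons, List.map_append, ih, pv_filter_eq_get? item hnd c, List.filter_cons]
    rcases (PySem.Dict.mk item).get? c with _ | v <;> simp

-- A's per-item result in normal form
theorem pvA_eq_target (item : List (String × String)) (hnd : (item.map Prod.fst).Nodup) :
    pvOrderedItemA item = pvTarget item := by
  unfold pvOrderedItemA pvTarget
  have hd : List.Nodup pvDesiredOrder := by decide
  rw [pv_loop2 _ _ hnd, pv_loop1 item pvDesiredOrder PySem.Dict.empty
      (fun c _ => PySem.Dict.contains_empty c) hd]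
  have hitems : (PySem.Dict.empty : PySem.Dict String String).items = [] := rfl
  rw [hitems, List.nil_append, ← pv_flatMap_eq_filterMap item hnd]
  congr 1
  refine List.filter_congr ?_
  intro kv hkv
  congr 1
  have hcont : ∀ (d : PySem.Dict String String),
      d.contains kv.1 = true ↔ kv.1 ∈ d.items.map Prod.fst := fun d =>
    (PySem.Dict.contains_iff_mem_keys d kv.1).trans (by simp [PySem.Dict.keys])
  rw [Bool.eq_iff_iff, hcont, pv_loop1 item pvDesiredOrder PySem.Dict.empty
      (fun c _ => PySem.Dict.contains_empty c) hd, hitems, List.nil_append,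
      ← pv_flatMap_eq_filterMap item hnd, pv_flatMap_keys item hnd, List.contains_iff_mem,
      List.mem_filter]
  have hs := pv_get?_isSome_of_mem item kv hkv
  exact ⟨fun h => h.1, fun h => ⟨h, hs⟩⟩

-- B's grouping loop, generalized over the accumulator dict and the bucket-key function
theorem pv_groups_fold (gk : (String × String) → Option String) (l : List (String × String))
    (d : PySem.Dict (Option String) (List (String × String))) (c' : Option String) :
    ((l.foldl (fun g kv => g.modify (gk kv) [] (· ++ [kv])) d).getD c' [])
      = d.getD c' [] ++ l.filter (fun kv => gk kv == c') := by
  induction l generalizing d with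
  | nil => simp
  | cons kv l ih =>
    rw [List.foldl_cons, ih, PySem.Dict.getD_modify, List.filter_cons]
    by_cases hc : c' = gk kv
    · subst hc
      rw [if_pos rfl, if_pos (by simp), List.append_assoc, List.singleton_append]
    · have hb : ¬ ((gk kv == c') = true) := by
        simp only [beq_iff_eq]
        exact fun h => hc h.symm
      rw [if_neg hc, if_neg hb]

-- B's groups: each bucket is a filter of the item
theorem pv_groups_getD (item : List (String × String)) (c' : Option String) :
    ((item.foldl (fun g kv =>
        g.modify (if (PySem.Set.ofList pvDesiredOrder).contains kv.1 then some kv.1 else none)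
          [] (· ++ [kv]))
        (PySem.Dict.empty : PySem.Dict (Option String) (List (String × String)))).getD c' [])
      = item.filter (fun kv =>
          (if (PySem.Set.ofList pvDesiredOrder).contains kv.1 then some kv.1 else none) == c') := by
  rw [pv_groups_fold (fun kv =>
      if (PySem.Set.ofList pvDesiredOrder).contains kv.1 then some kv.1 else none) item
      PySem.Dict.empty c', PySem.Dict.getD_empty, List.nil_append]

-- membership in pvDesiredOrder decides both Bool tests the same way
theorem pv_contains_agree (x : String) :
    (PySem.Set.ofList pvDesiredOrder).contains x = pvDesiredOrder.contains x := by
  rw [Bool.eq_iff_iff, PySem.Set.contains_iff, List.contains_iff_mem]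
  exact PySem.Set.mem_ofList pvDesiredOrder x

-- B's per-item result in normal form
theorem pvB_eq_target (item : List (String × String)) (hnd : (item.map Prod.fst).Nodup) :
    pvReorderB item = pvTarget item := by
  simp only [pvReorderB]
  rw [PySem.List.foldl_append_eq_flatMap, List.nil_append]
  have hgroups : (pvDesiredOrder.flatMap (fun c =>
        ((item.foldl (fun g kv =>
            g.modify (if (PySem.Set.ofList pvDesiredOrder).contains kv.1 then some kv.1 else none)
              [] (· ++ [kv]))
            (PySem.Dict.empty : PySem.Dict (Option String) (List (String × String)))).getD (some c) []))
      ++ ((item.foldl (fun g kv =>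
            g.modify (if (PySem.Set.ofList pvDesiredOrder).contains kv.1 then some kv.1 else none)
              [] (· ++ [kv]))
            (PySem.Dict.empty : PySem.Dict (Option String) (List (String × String)))).getD none []))
      = pvTarget item := by
    unfold pvTarget
    congr 1
    · refine List.flatMap_congr ?_
      intro c hc
      rw [pv_groups_getD]
      refine List.filter_congr ?_
      intro kv _
      rw [pv_contains_agree]
      by_cases hm : kv.1 ∈ pvDesiredOrder
      · simp [hm]
      · have hne : kv.1 ≠ c := fun h => hm (h ▸ hc)
        simp [hm, hne]
    · rw [pv_groups_getD]
      refine List.filter_congr ?_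
      intro kv _
      rw [pv_contains_agree]
      by_cases hm : kv.1 ∈ pvDesiredOrder <;> simp [hm]
  rw [hgroups]
  -- keys of pvTarget are duplicate-free, so dict(pairs) keeps exactly the pairs
  have hkeys : ((pvTarget item).map Prod.fst).Nodup := by
    unfold pvTarget
    rw [List.map_append, pv_flatMap_keys item hnd]
    refine List.Nodup.append ((by decide : List.Nodup pvDesiredOrder).filter _)
      (((List.filter_sublist).map Prod.fst).nodup hnd) ?_
    intro x hx₁ hx₂
    rw [List.mem_filter] at hx₁
    obtain ⟨kv, hkv, rfl⟩ := List.mem_map.mp hx₂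
    rw [List.mem_filter] at hkv
    exact (by simpa [List.contains_iff_mem] using hkv.2 : kv.1 ∉ pvDesiredOrder) hx₁.1
  rw [PySem.Dict.items_foldl_insert_fresh (pvTarget item) Prod.fst Prod.snd PySem.Dict.empty
      (fun a _ => PySem.Dict.contains_empty a.1) hkeys]
  simp [show (PySem.Dict.empty : PySem.Dict String String).items = [] from rfl]

-- ===== VERDICT (by name: the statement is the Claim_ definition above) =====
theorem enforce_column_order_list_spec : Claim_equal_enforce_column_order_list := by
  intro data_list _ hpre
  unfold Spec_enforce_column_order_list enforce_column_order_list enforce_column_order_list_alt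
  by_cases he : data_list.isEmpty
  · simp [he]
  · simp only [he, if_false, Bool.false_eq_true]
    rw [PySem.List.foldl_append_singleton_eq_map pvOrderedItemA data_list [], List.nil_append]
    refine List.map_congr_left ?_
    intro item hitem
    rw [pvA_eq_target item (hpre item hitem), pvB_eq_target item (hpre item hitem)]
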